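-- pv_equiv track=rewrite | github.com/saravana-tk/python-interview-prep | solution-3-apr-2-2025.py | solution
-- ===== SOURCE A (Python) =====
-- def solution(numbers):
--     count = {}
--     intermediate_list = []
--     final_list = []
--     for i in numbers:
--         if i % 10 == 0:
--             intermediate_list.append(1)
--         else:
--             intermediate_list.append(i + 1)
--     for i in intermediate_list:
--         if i in count:
--             count[i] += 1
--         else:
--             count[i] = 1
--     for key, value in count.items():
--         final_list.append(key * value)
--     final_list.sort()
--     return final_list
-- ===== SOURCE B (Python) =====
-- def solution(numbers):
--     transformed = sorted((1 if i % 10 == 0 else i + 1) for i in numbers)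
--     result = []
--     if transformed:
--         run_val = transformed[0]
--         run_len = 1
--         for x in transformed[1:]:
--             if x == run_val:
--                 run_len += 1
--             else:
--                 result.append(run_val * run_len)
--                 run_val = x
--                 run_len = 1
--         result.append(run_val * run_len)
--     result.sort()
--     return result
-- ===== Notes on version B (the rewrite author's own statement) =====
-- stated objective: alternative
-- what changed: Replaces A's dict-based counting of the transformed values by sorting the transformed list once and counting adjacent runs with a single run-length scan; the final sort normalizes the output order.
import Mathlib
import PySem

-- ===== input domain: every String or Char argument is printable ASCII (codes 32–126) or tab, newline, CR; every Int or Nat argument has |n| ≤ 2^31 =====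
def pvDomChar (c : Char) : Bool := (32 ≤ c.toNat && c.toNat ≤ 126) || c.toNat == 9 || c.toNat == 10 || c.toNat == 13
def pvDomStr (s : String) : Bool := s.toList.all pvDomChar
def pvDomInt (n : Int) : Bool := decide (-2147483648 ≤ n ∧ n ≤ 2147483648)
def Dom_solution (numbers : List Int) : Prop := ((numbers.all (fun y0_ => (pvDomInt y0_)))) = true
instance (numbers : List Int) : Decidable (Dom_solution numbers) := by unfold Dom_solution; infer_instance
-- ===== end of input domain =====

-- B replaces A's dict-based counting by sort-then-adjacent-run counting (alternative decomposition, same results).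

-- ===== PORT A =====
-- transliteration of Source A: transform loop, dict-count loop, items loop, final in-place sort
def solution (numbers : List Int) : List Int :=
  let intermediate_list :=
    numbers.foldl (fun acc i =>
      if PySem.Int.mod i 10 == 0 then acc ++ [(1 : Int)] else acc ++ [i + 1]) []
  let count :=
    intermediate_list.foldl (fun (d : PySem.Dict Int Int) i =>
      if d.contains i then d.insert i (d.getD i 0 + 1) else d.insert i 1) PySem.Dict.empty
  let final_list :=
    count.items.foldl (fun acc kv => acc ++ [kv.1 * kv.2]) []
  PySem.List.sorted final_list (fun x => x) false

-- ===== PORT B =====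
-- transliteration of Source B: sort the transformed list, scan it once counting adjacent runs, sort the products
def solution_alt (numbers : List Int) : List Int :=
  let transformed :=
    PySem.List.sorted (numbers.map (fun i => if PySem.Int.mod i 10 == 0 then (1 : Int) else i + 1))
      (fun x => x) false
  let result :=
    match transformed with
    | [] => ([] : List Int)
    | v :: rest =>
      let st := rest.foldl
        (fun (st : List Int × Int × Int) x =>
          if x == st.2.1 then (st.1, st.2.1, st.2.2 + 1)
          else (st.1 ++ [st.2.1 * st.2.2], x, 1)) ([], v, 1)
      st.1 ++ [st.2.1 * st.2.2]
  PySem.List.sorted result (fun x => x) false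

-- ===== PRECONDITION & SPEC =====
def Spec_solution (numbers : List Int) (out : List Int) : Prop := out = solution_alt numbers
instance (numbers : List Int) (out : List Int) : Decidable (Spec_solution numbers out) := by unfold Spec_solution; infer_instance

-- ===== CLAIM (what is proved, stated in full; the proofs are below) =====
def Claim_equal_solution : Prop := ∀ (numbers : List Int), Dom_solution numbers → Spec_solution numbers (solution numbers)

-- ===== LEMMAS AND PROOFS =====

-- the transform both programs apply to each element
def pvF (i : Int) : Int := if PySem.Int.mod i 10 == 0 then (1 : Int) else i + 1

-- B's run-length loop step (definitionally the lambda in solution_alt)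
def runStep (st : List Int × Int × Int) (x : Int) : List Int × Int × Int :=
  if x == st.2.1 then (st.1, st.2.1, st.2.2 + 1)
  else (st.1 ++ [st.2.1 * st.2.2], x, 1)

-- B's run-length loop as a pure recursion (proof-side)
def runsP (v c : Int) : List Int → List Int
  | [] => [v * c]
  | x :: xs => if x = v then runsP v (c + 1) xs else (v * c) :: runsP x 1 xs

-- first occurrences of each distinct value, in order (proof-side characterisation)
def firsts : List Int → List Int
  | [] => []
  | x :: xs => x :: (firsts xs).filter (fun k => !(k == x))

theorem mem_firsts (l : List Int) (x : Int) : x ∈ firsts l ↔ x ∈ l := by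
  induction l with
  | nil => simp [firsts]
  | cons y ys ih =>
    by_cases hxy : x = y
    · subst hxy; simp [firsts]
    · simp [firsts, List.mem_filter, hxy, ih]

theorem nodup_firsts (l : List Int) : (firsts l).Nodup := by
  induction l with
  | nil => simp [firsts]
  | cons y ys ih =>
    simp only [firsts, List.nodup_cons]
    constructor
    · intro hy
      have := (List.mem_filter.mp hy).2
      simp at this
    · exact ih.filter _

theorem foldl_runs_eq_runsP (l : List Int) (res : List Int) (v c : Int) :
    (l.foldl runStep (res, v, c)).1 ++
      [(l.foldl runStep (res, v, c)).2.1 * (l.foldl runStep (res, v, c)).2.2]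
      = res ++ runsP v c l := by
  induction l generalizing res v c with
  | nil => simp [runsP]
  | cons x xs ih =>
    simp only [List.foldl_cons, runsP, runStep]
    by_cases h : x = v
    · simp [h, ih]
    · simp [h, ih]

-- on a sorted list, the run-length scan produces value * count for each distinct value, in order
theorem runsP_sorted (l : List Int) (v c : Int) (h : (v :: l).Pairwise (· ≤ ·)) :
    runsP v c l =
      (v * (c + (l.count v : Int))) ::
        ((firsts l).filter (fun k => !(k == v))).map (fun k => k * (l.count k : Int)) := by
  induction l generalizing v c with
  | nil => simp [runsP, firsts]
  | cons x xs ih =>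
    by_cases hxv : x = v
    · subst hxv
      rw [runsP, if_pos rfl, ih _ _ h.of_cons]
      congr 1
      · rw [List.count_cons_self]; push_cast; ring
      · have hfil : (firsts (x :: xs)).filter (fun k => !(k == x))
            = (firsts xs).filter (fun k => !(k == x)) := by
          simp [firsts, List.filter_filter]
        rw [hfil]
        apply List.map_congr_left
        intro k hk
        have hkx : k ≠ x := by
          have := (List.mem_filter.mp hk).2
          simpa using this
        simp only [List.count_cons]
        simp
        exact Or.inl (Ne.symm hkx)
    · have hvx : v ≤ x := (List.pairwise_cons.mp h).1 x (by simp)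
      have hvlt : v < x := lt_of_le_of_ne hvx (fun e => hxv e.symm)
      have hnot : v ∉ x :: xs := by
        intro hmem
        rcases List.mem_cons.mp hmem with h1 | h2
        · exact hxv h1.symm
        · have hx_le : x ≤ v := (List.pairwise_cons.mp h.of_cons).1 v h2
          exact absurd hvlt (not_lt.mpr hx_le)
      rw [runsP, if_neg hxv, ih _ _ h.of_cons]
      have hcv : (x :: xs).count v = 0 := List.count_eq_zero.mpr hnot
      congr 1
      · rw [hcv]; push_cast; ring
      · have hall : (firsts (x :: xs)).filter (fun k => !(k == v)) = firsts (x :: xs) := by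
          apply List.filter_eq_self.mpr
          intro k hk
          have hkm : k ∈ x :: xs := (mem_firsts _ _).mp hk
          have hkv : k ≠ v := fun e => hnot (e ▸ hkm)
          simpa using hkv
        rw [hall]
        show (x * (1 + (xs.count x : Int))) :: _ = _
        rw [firsts, List.map_cons]
        congr 1
        · rw [List.count_cons_self]; push_cast; ring
        · apply List.map_congr_left
          intro k hk
          have hkx : k ≠ x := by
            have := (List.mem_filter.mp hk).2
            simpa using this
          simp only [List.count_cons]
          simp
          exact Or.inl (Ne.symm hkx)

-- A's transform loop builds the mapped list
theorem interm_eq (numbers : List Int) :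
    numbers.foldl (fun acc i =>
        if PySem.Int.mod i 10 == 0 then acc ++ [(1 : Int)] else acc ++ [i + 1]) []
      = numbers.map pvF := by
  have hstep := PySem.List.foldl_congr_mem (l := numbers) (init := ([] : List Int))
      (f := fun acc i => if PySem.Int.mod i 10 == 0 then acc ++ [(1 : Int)] else acc ++ [i + 1])
      (g := fun acc i => acc ++ [pvF i])
      (by intro acc x _; simp only [pvF]; split <;> rfl)
  rw [hstep]
  simpa using PySem.List.foldl_append_singleton_eq_map (l := numbers) (f := pvF) (acc := [])

-- A's dict loop is Counter
theorem count_eq (t : List Int) :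
    t.foldl (fun (d : PySem.Dict Int Int) i =>
        if d.contains i then d.insert i (d.getD i 0 + 1) else d.insert i 1) PySem.Dict.empty
      = PySem.Dict.counter t := by
  have hstep := PySem.List.foldl_congr_mem (l := t) (init := (PySem.Dict.empty : PySem.Dict Int Int))
      (f := fun (d : PySem.Dict Int Int) i =>
        if d.contains i then d.insert i (d.getD i 0 + 1) else d.insert i 1)
      (g := fun (d : PySem.Dict Int Int) i => d.modify i 0 (· + 1))
      (by
        intro d i _
        by_cases h : d.contains i
        · simp [h, PySem.Dict.modify]
        · have h' : d.contains i = false := by simpa using h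
          have h0 : d.getD i (0 : Int) = 0 := PySem.Dict.getD_of_not_contains d 0 h'
          simp [h, PySem.Dict.modify, h0])
  rw [hstep]
  rfl

-- main equivalence
theorem solution_eq (numbers : List Int) : solution numbers = solution_alt numbers := by
  simp only [solution, solution_alt]
  rw [interm_eq, count_eq]
  have hfinal :
      (PySem.Dict.counter (numbers.map pvF)).items.foldl (fun acc kv => acc ++ [kv.1 * kv.2]) []
        = (PySem.Set.ofList (numbers.map pvF)).map (fun k => k * ((numbers.map pvF).count k : Int)) := by
    rw [show ((PySem.Dict.counter (numbers.map pvF)).items.foldl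
          (fun acc kv => acc ++ [kv.1 * kv.2]) [])
        = (PySem.Dict.counter (numbers.map pvF)).items.map (fun kv => kv.1 * kv.2) from by
      simpa using PySem.List.foldl_append_singleton_eq_map
        (l := (PySem.Dict.counter (numbers.map pvF)).items) (f := fun kv => kv.1 * kv.2) (acc := [])]
    rw [PySem.Dict.items_counter, List.map_map]
    rfl
  rw [hfinal]
  have hmapf : numbers.map (fun i => if PySem.Int.mod i 10 == 0 then (1 : Int) else i + 1)
      = numbers.map pvF := rfl
  rw [hmapf]
  have hperm : (PySem.List.sorted (numbers.map pvF) (fun x => x) false).Perm (numbers.map pvF) :=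
    PySem.List.sorted_perm _ _ _
  cases hs : PySem.List.sorted (numbers.map pvF) (fun x => x) false with
  | nil =>
    have ht : numbers.map pvF = [] := by
      have := hperm
      rw [hs] at this
      exact (List.Perm.nil_eq this).symm
    rw [ht]
    rfl
  | cons v rest =>
    rw [hs] at hperm
    have hpw : (v :: rest).Pairwise (· ≤ ·) := by
      have := PySem.List.sorted_pairwise (xs := numbers.map pvF) (key := fun x => x)
      rw [hs] at this
      simpa using this
    have hrun :
        ((rest.foldl runStep ([], v, 1)).1 ++
          [(rest.foldl runStep ([], v, 1)).2.1 * (rest.foldl runStep ([], v, 1)).2.2])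
          = (firsts (v :: rest)).map (fun k => k * ((v :: rest).count k : Int)) := by
      rw [foldl_runs_eq_runsP, List.nil_append, runsP_sorted rest v 1 hpw]
      rw [firsts, List.map_cons]
      congr 1
      · rw [List.count_cons_self]; push_cast; ring
      · apply List.map_congr_left
        intro k hk
        have hkv : k ≠ v := by
          have := (List.mem_filter.mp hk).2
          simpa using this
        simp only [List.count_cons]
        simp
        exact Or.inl (Ne.symm hkv)
    show PySem.List.sorted _ (fun x => x) false
        = PySem.List.sorted ((rest.foldl runStep ([], v, 1)).1 ++
            [(rest.foldl runStep ([], v, 1)).2.1 * (rest.foldl runStep ([], v, 1)).2.2])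
            (fun x => x) false
    rw [hrun]
    apply (PySem.List.sorted_id_eq_sorted_id_iff_perm _ _).mpr
    have hcounts : ∀ k : Int, (numbers.map pvF).count k = (v :: rest).count k := by
      intro k
      exact (hperm.count_eq k).symm
    have h1 : (PySem.Set.ofList (numbers.map pvF)).map (fun k => k * ((numbers.map pvF).count k : Int))
        = (PySem.Set.ofList (numbers.map pvF)).map (fun k => k * (((v :: rest).count k : Nat) : Int)) := by
      apply List.map_congr_left
      intro k _
      rw [hcounts k]
    rw [h1]
    apply List.Perm.map
    apply (List.perm_ext_iff_of_nodup (PySem.Set.nodup_ofList _) (nodup_firsts _)).mpr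
    intro k
    rw [PySem.Set.mem_ofList, mem_firsts]
    exact hperm.mem_iff.symm

-- ===== VERDICT (by name: the statement is the Claim_ definition above) =====
theorem solution_spec : Claim_equal_solution := by
  intro numbers _
  unfold Spec_solution
  exact solution_eq numbers
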